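-- pv_equiv track=rewrite | github.com/nedaZarei/sample-dbt- | snowflake/benchmark/benchmark.py | filter_fqn_models_by_final_models
-- ===== SOURCE A (Python) =====
-- from typing import Dict, Any, Optional, List
--
-- def filter_fqn_models_by_final_models(
--     fqn_models: List[str],
--     final_models: List[str]
-- ) -> List[Dict[str, str]]:
--     """
--     Filter FQN models to match final_models with case-insensitive matching.
--
--     Args:
--         fqn_models: List of fully qualified model names (e.g., 'DBT_DEMO.DEV.FACT_PORTFOLIO_SUMMARY')
--         final_models: List of final model names from config (lowercase, e.g., 'fact_portfolio_summary')
--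
--     Returns:
--         List of dicts with 'model_name' and 'fqn' keys for matched models
--     """
--     # Create a mapping of lowercase model names to FQNs
--     fqn_lower_map = {fqn.split('.')[-1].lower(): fqn for fqn in fqn_models}
--
--     # Filter to only final models
--     final_models_lower = [m.lower() for m in final_models]
--
--     result = []
--     for final_model in final_models_lower:
--         if final_model in fqn_lower_map:
--             fqn = fqn_lower_map[final_model]
--             result.append({
--                 'model_name': final_model,
--                 'fqn': fqn,
--             })
--
--     return result
-- ===== SOURCE B (Python) =====
-- def filter_fqn_models_by_final_models(fqn_models, final_models):
--     """Same result as A, but without the prebuilt index: for each final model,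
--     scan fqn_models and keep the LAST fqn whose last dotted segment matches
--     case-insensitively (mirroring dict overwrite semantics)."""
--     result = []
--     for final_model in final_models:
--         m = final_model.lower()
--         found = None
--         for fqn in fqn_models:
--             if fqn.split('.')[-1].lower() == m:
--                 found = fqn
--         if found is not None:
--             result.append({'model_name': m, 'fqn': found})
--     return result
-- ===== Notes on version B (the rewrite author's own statement) =====
-- stated objective: alternative
-- what changed: Replaces the prebuilt lowercase-key dict with a direct nested scan: for each final model B scans fqn_models keeping the last case-insensitive match, so no index is built.
import Mathlib
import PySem

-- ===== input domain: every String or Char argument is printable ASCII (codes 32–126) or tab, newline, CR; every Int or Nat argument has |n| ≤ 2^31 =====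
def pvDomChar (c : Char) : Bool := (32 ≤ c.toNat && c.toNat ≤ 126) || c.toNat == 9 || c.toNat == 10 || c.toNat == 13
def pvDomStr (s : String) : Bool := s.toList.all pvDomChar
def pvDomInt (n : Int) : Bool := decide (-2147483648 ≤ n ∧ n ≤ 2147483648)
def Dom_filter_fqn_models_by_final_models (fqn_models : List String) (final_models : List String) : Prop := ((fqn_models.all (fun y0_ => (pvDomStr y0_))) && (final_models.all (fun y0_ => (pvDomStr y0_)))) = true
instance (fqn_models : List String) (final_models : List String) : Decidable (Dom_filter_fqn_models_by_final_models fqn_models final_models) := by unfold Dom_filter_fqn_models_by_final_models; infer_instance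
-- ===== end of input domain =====

-- ===== PORT A =====
-- B replaces A's prebuilt lowercase-key dict with a direct last-match scan per final model (alternative decomposition, same results).
-- shared key expression fqn.split('.')[-1].lower() (both Pythons compute it verbatim)
def pvKey (fqn : String) : String :=
  PySem.Str.lower ((PySem.List.pyGet? ((PySem.Str.split? fqn ".").getD []) (-1)).getD "")

def filter_fqn_models_by_final_models (fqn_models : List String) (final_models : List String) : List (List (String × String)) :=
  let fqn_lower_map : PySem.Dict String String :=
    fqn_models.foldl (fun d fqn => d.insert (pvKey fqn) fqn) PySem.Dict.empty
  let final_models_lower := final_models.map PySem.Str.lower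
  final_models_lower.foldl (fun result final_model =>
    match fqn_lower_map.get? final_model with
    | some fqn => result ++ [[("model_name", final_model), ("fqn", fqn)]]
    | none => result) []

-- ===== PORT B =====
def filter_fqn_models_by_final_models_alt (fqn_models : List String) (final_models : List String) : List (List (String × String)) :=
  final_models.foldl (fun result final_model =>
    let m := PySem.Str.lower final_model
    match fqn_models.foldl (fun found fqn => if pvKey fqn = m then some fqn else found) none with
    | some fqn => result ++ [[("model_name", m), ("fqn", fqn)]]
    | none => result) []

-- ===== PRECONDITION & SPEC =====
def Spec_filter_fqn_models_by_final_models (fqn_models : List String) (final_models : List String) (out : List (List (String × String))) : Prop := out = filter_fqn_models_by_final_models_alt fqn_models final_models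
instance (fqn_models : List String) (final_models : List String) (out : List (List (String × String))) : Decidable (Spec_filter_fqn_models_by_final_models fqn_models final_models out) := by unfold Spec_filter_fqn_models_by_final_models; infer_instance

-- ===== CLAIM (what is proved, stated in full; the proofs are below) =====
def Claim_equal_filter_fqn_models_by_final_models : Prop := ∀ (fqn_models : List String) (final_models : List String), Dom_filter_fqn_models_by_final_models fqn_models final_models → Spec_filter_fqn_models_by_final_models fqn_models final_models (filter_fqn_models_by_final_models fqn_models final_models)

-- ===== LEMMAS AND PROOFS =====
-- Lookup in the insert-loop dict equals the last-match scan.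
theorem pvGet_foldl_insert (xs : List String) (d : PySem.Dict String String) (m : String) :
    (xs.foldl (fun d fqn => d.insert (pvKey fqn) fqn) d).get? m
      = xs.foldl (fun found fqn => if pvKey fqn = m then some fqn else found) (d.get? m) := by
  induction xs generalizing d with
  | nil => rfl
  | cons x xs ih =>
    simp only [List.foldl_cons, ih, PySem.Dict.get?_insert]
    by_cases h : pvKey x = m
    · simp [h]
    · rw [if_neg (fun hh => h hh.symm), if_neg h]

-- ===== VERDICT (by name: the statement is the Claim_ definition above) =====
theorem filter_fqn_models_by_final_models_spec : Claim_equal_filter_fqn_models_by_final_models := by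
  intro fqn_models final_models _
  unfold Spec_filter_fqn_models_by_final_models
  unfold filter_fqn_models_by_final_models filter_fqn_models_by_final_models_alt
  rw [List.foldl_map]
  congr 1
  funext res fm
  rw [pvGet_foldl_insert, PySem.Dict.get?_empty]
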